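-- pv_equiv track=rewrite | github.com/jestsee/tubes-1-ai | scratch.py | getAvail
-- ===== SOURCE A (Python) =====
-- def getAvail(matrix):
--     availIdx = []
--
--     for col in range(len(matrix[0])):
--
--         # iterasi dari bawah
--         for row in range(len(matrix)-1,-1,-1):
--             if(matrix[row][col] == "x"):
--                 availIdx.append((row,col))
--                 break
--
--     return availIdx
-- ===== SOURCE B (Python) =====
-- def getAvail(matrix):
--     nrows = len(matrix)
--     ncols = len(matrix[0])
--     bottom = {}
--     for row in range(nrows):
--         for col in range(ncols):
--             if matrix[row][col] == "x":
--                 bottom[col] = row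
--     return [(bottom[col], col) for col in sorted(bottom)]
-- ===== Notes on version B (the rewrite author's own statement) =====
-- stated objective: alternative
-- what changed: Replaces the per-column bottom-up scan with early break by a single top-to-bottom row-major pass that builds a dict mapping each column to the last row containing 'x' (later rows overwrite), then emits the pairs over the sorted column keys.
-- outside the precondition, e.g. on getAvail([['x', 'x'], ['a'], ['x', 'x']]): A returns [(2, 0), (2, 1)], B raises IndexError
import Mathlib
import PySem

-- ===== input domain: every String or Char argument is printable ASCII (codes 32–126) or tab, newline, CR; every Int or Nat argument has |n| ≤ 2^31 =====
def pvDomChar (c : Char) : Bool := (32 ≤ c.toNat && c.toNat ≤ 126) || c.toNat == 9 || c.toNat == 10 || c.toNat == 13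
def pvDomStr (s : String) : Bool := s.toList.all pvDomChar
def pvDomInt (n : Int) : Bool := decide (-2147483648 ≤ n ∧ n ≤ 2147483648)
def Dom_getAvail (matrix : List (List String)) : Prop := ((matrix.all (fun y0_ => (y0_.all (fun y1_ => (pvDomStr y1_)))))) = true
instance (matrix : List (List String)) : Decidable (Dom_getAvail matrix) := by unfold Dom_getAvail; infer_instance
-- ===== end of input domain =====

-- B replaces A's per-column bottom-up scan (early break) by one row-major top-to-bottom pass
-- building a column→last-'x'-row dict, emitted over sorted keys (alternative algorithm, same cost).


-- ===== PORT A =====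
-- inner 'for row in range(len(matrix)-1,-1,-1): … break' loop of A
def pvFindBottom (matrix : List (List String)) (col : Int) : List Int → List (Int × Int)
  | [] => []
  | r :: rest =>
    if PySem.List.pyGetD (PySem.List.pyGetD matrix r []) col "" == "x" then [(r, col)]
    else pvFindBottom matrix col rest

def getAvail (matrix : List (List String)) : List (Int × Int) :=
  (PySem.List.pyRange 0 ((PySem.List.pyGetD matrix 0 []).length : Int) 1).foldl
    (fun acc col => acc ++ pvFindBottom matrix col
        (PySem.List.pyRange ((matrix.length : Int) - 1) (-1) (-1))) []

-- ===== PORT B =====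
-- inner 'for col in range(ncols)' loop of B: record row as the bottom-so-far of each 'x' column
def pvScanRow (matrix : List (List String)) (ncols : Int) (d : PySem.Dict Int Int) (row : Int) :
    PySem.Dict Int Int :=
  (PySem.List.pyRange 0 ncols 1).foldl
    (fun d col =>
      if PySem.List.pyGetD (PySem.List.pyGetD matrix row []) col "" == "x" then d.insert col row
      else d) d

def getAvail_alt (matrix : List (List String)) : List (Int × Int) :=
  let ncols : Int := ((PySem.List.pyGetD matrix 0 []).length : Int)
  let bottom := (PySem.List.pyRange 0 (matrix.length : Int) 1).foldl (pvScanRow matrix ncols)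
    PySem.Dict.empty
  (PySem.List.sorted bottom.keys (fun x => x) false).map (fun col => (bottom.getD col 0, col))

-- ===== PRECONDITION & SPEC =====
-- Pre_ excludes the empty matrix (A raises IndexError on matrix[0]) and ragged matrices with a
-- row shorter than row 0, on which A either raises IndexError or returns only by accident of its
-- early break skipping the short cells, while B's full row-major scan raises IndexError there.
def Pre_getAvail (matrix : List (List String)) : Prop :=
  matrix ≠ [] ∧ ∀ row ∈ matrix, (PySem.List.pyGetD matrix 0 []).length ≤ row.length
instance (matrix : List (List String)) : Decidable (Pre_getAvail matrix) := by
  unfold Pre_getAvail; infer_instance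
def pvWitness_getAvail : List (List String) := [["x", "a"], ["a", "x"]]
def Spec_getAvail (matrix : List (List String)) (out : List (Int × Int)) : Prop := out = getAvail_alt matrix
instance (matrix : List (List String)) (out : List (Int × Int)) : Decidable (Spec_getAvail matrix out) := by unfold Spec_getAvail; infer_instance

-- ===== CLAIM (what is proved, stated in full; the proofs are below) =====
def Claim_equal_getAvail : Prop := ∀ (matrix : List (List String)), Dom_getAvail matrix → Pre_getAvail matrix → Spec_getAvail matrix (getAvail matrix)

-- ===== LEMMAS AND PROOFS =====

-- the cell test both ports make
def pvHasX (matrix : List (List String)) (r c : Int) : Bool :=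
  PySem.List.pyGetD (PySem.List.pyGetD matrix r []) c "" == "x"

-- A's inner loop finds the first 'x' in its row order
theorem pvFindBottom_eq_find? (matrix : List (List String)) (col : Int) (rows : List Int) :
    pvFindBottom matrix col rows =
      match rows.find? (fun r => pvHasX matrix r col) with
      | some r => [(r, col)]
      | none => [] := by
  induction rows with
  | nil => rfl
  | cons r rest ih =>
    cases h : pvHasX matrix r col with
    | true =>
      have h' : (PySem.List.pyGetD (PySem.List.pyGetD matrix r []) col "" == "x") = true := h
      simp [pvFindBottom, h, h']
    | false =>
      have h' : (PySem.List.pyGetD (PySem.List.pyGetD matrix r []) col "" == "x") = false := h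
      simp [pvFindBottom, h, h', ih]

-- flatMap of an option-to-singleton function is filter-then-map
theorem pvFlatMap_opt (fnd : Int → Option Int) (cols : List Int) :
    (cols.flatMap (fun c =>
        match fnd c with
        | some r => [(r, c)]
        | none => ([] : List (Int × Int)))) =
      (cols.filter (fun c => (fnd c).isSome)).map (fun c => ((fnd c).getD 0, c)) := by
  induction cols with
  | nil => rfl
  | cons c rest ih =>
    cases h : fnd c <;> simp [List.flatMap_cons, h, ih]

-- B's inner loop, lookup characterisation
theorem pvInner_get? (q : Int → Bool) (row : Int) (L : List Int) (d : PySem.Dict Int Int) (c : Int) :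
    ((L.foldl (fun d col => if q col then d.insert col row else d) d).get? c) =
      if c ∈ L ∧ q c = true then some row else d.get? c := by
  induction L generalizing d with
  | nil => simp
  | cons a t ih =>
    simp only [List.foldl_cons, ih]
    by_cases hm : c ∈ t ∧ q c = true
    · simp [hm]
    · by_cases hca : c = a
      · subst hca
        by_cases hq : q c = true
        · simp [hq, PySem.Dict.get?_insert_self]
        · simp only [Bool.not_eq_true] at hq
          simp [hq]
      · by_cases hq : q a = true
        · simp [hm, hq, PySem.Dict.get?_insert_of_ne d row hca, List.mem_cons, hca]
        · simp only [Bool.not_eq_true] at hq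
          simp [hm, hq, List.mem_cons, hca]

-- B's outer loop, lookup characterisation: the LAST row (= first in reverse) wins
theorem pvOuter_get? (matrix : List (List String)) (ncols : Int) (Rs : List Int)
    (d : PySem.Dict Int Int) (c : Int) :
    ((Rs.foldl (pvScanRow matrix ncols) d).get? c) =
      match Rs.reverse.find?
          (fun r => decide (c ∈ PySem.List.pyRange 0 ncols 1) && pvHasX matrix r c) with
      | some r => some r
      | none => d.get? c := by
  induction Rs generalizing d with
  | nil => rfl
  | cons a t ih =>
    simp only [List.foldl_cons, ih, List.reverse_cons, List.find?_append]
    cases hf : t.reverse.find?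
        (fun r => decide (c ∈ PySem.List.pyRange 0 ncols 1) && pvHasX matrix r c) with
    | some r => rfl
    | none =>
      simp only [Option.none_or]
      show ((PySem.List.pyRange 0 ncols 1).foldl
        (fun d col => if (PySem.List.pyGetD (PySem.List.pyGetD matrix a []) col "" == "x") = true
          then d.insert col a else d) d).get? c = _
      rw [pvInner_get? (fun col => PySem.List.pyGetD (PySem.List.pyGetD matrix a []) col "" == "x")
        a _ d c]
      by_cases hc : c ∈ PySem.List.pyRange 0 ncols 1
      · by_cases hx : pvHasX matrix a c = true
        · have hx' : (PySem.List.pyGetD (PySem.List.pyGetD matrix a []) c "" == "x") = true := hx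
          simp [List.find?, hc, hx, hx']
        · have hx' : (PySem.List.pyGetD (PySem.List.pyGetD matrix a []) c "" == "x") = false := by
            simpa [pvHasX] using hx
          simp [List.find?, hc, hx', hx]
      · simp [List.find?, hc]

-- keys stay Nodup through any fold whose step preserves Nodup keys
theorem pvNodup_foldl {α : Type} (step : PySem.Dict Int Int → α → PySem.Dict Int Int)
    (h : ∀ d x, (PySem.Dict.keys d).Nodup → (PySem.Dict.keys (step d x)).Nodup)
    (L : List α) (d : PySem.Dict Int Int) (hd : (PySem.Dict.keys d).Nodup) :
    ((L.foldl step d).keys).Nodup := by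
  induction L generalizing d with
  | nil => exact hd
  | cons a t ih => exact ih (step d a) (h d a hd)

theorem pvScanRow_nodup (matrix : List (List String)) (ncols : Int) (d : PySem.Dict Int Int)
    (row : Int) (hd : (PySem.Dict.keys d).Nodup) :
    ((pvScanRow matrix ncols d row).keys).Nodup := by
  unfold pvScanRow
  refine pvNodup_foldl _ ?_ _ d hd
  intro d col h
  by_cases hq : (PySem.List.pyGetD (PySem.List.pyGetD matrix row []) col "" == "x") = true
  · simpa [hq] using PySem.Dict.nodup_keys_insert d col row h
  · simp only [Bool.not_eq_true] at hq
    simpa [hq] using h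

theorem getAvail_spec_aux (matrix : List (List String)) :
    getAvail matrix = getAvail_alt matrix := by
  set C : Int := ((PySem.List.pyGetD matrix 0 []).length : Int) with hC
  set R : Int := (matrix.length : Int) with hR
  set cols : List Int := PySem.List.pyRange 0 C 1 with hcols
  -- the descending rows list is the reverse of the ascending one
  have hdesc : PySem.List.pyRange (R - 1) (-1) (-1) = (PySem.List.pyRange 0 R 1).reverse := by
    rw [PySem.List.pyRange_neg_one_eq_reverse]
    norm_num
  set bottom : PySem.Dict Int Int :=
    (PySem.List.pyRange 0 R 1).foldl (pvScanRow matrix C) PySem.Dict.empty with hbot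
  set fnd : Int → Option Int :=
    fun c => (PySem.List.pyRange (R - 1) (-1) (-1)).find? (fun r => pvHasX matrix r c) with hfnd
  -- bottom's lookup, for c ∈ cols, is exactly A's bottom-up find
  have hget : ∀ c ∈ cols, bottom.get? c = fnd c := by
    intro c hc
    have hc' : c ∈ PySem.List.pyRange 0 C 1 := hcols ▸ hc
    rw [hbot, pvOuter_get? matrix C _ PySem.Dict.empty c, ← hdesc]
    have hp : (fun r => decide (c ∈ PySem.List.pyRange 0 C 1) && pvHasX matrix r c) =
        fun r => pvHasX matrix r c := by
      funext r; simp [hc']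
    rw [hp]
    show _ = (PySem.List.pyRange (R - 1) (-1) (-1)).find? (fun r => pvHasX matrix r c)
    cases hf : (PySem.List.pyRange (R - 1) (-1) (-1)).find? (fun r => pvHasX matrix r c) <;>
      simp [PySem.Dict.get?_empty]
  have hget_none : ∀ c, c ∉ cols → bottom.get? c = none := by
    intro c hc
    have hc' : c ∉ PySem.List.pyRange 0 C 1 := hcols ▸ hc
    rw [hbot, pvOuter_get? matrix C _ PySem.Dict.empty c]
    have hp : (fun r => decide (c ∈ PySem.List.pyRange 0 C 1) && pvHasX matrix r c) =
        fun _ => false := by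
      funext r; simp [hc']
    rw [hp, List.find?_eq_none.2 (by simp)]
    simp [PySem.Dict.get?_empty]
  have hnodup : bottom.keys.Nodup := by
    rw [hbot]
    refine pvNodup_foldl _ ?_ _ _ (by simp [PySem.Dict.keys_empty])
    intro d row h
    exact pvScanRow_nodup matrix C d row h
  set T : List Int := cols.filter (fun c => (fnd c).isSome) with hT
  have hTpair : T.Pairwise (· < ·) := by
    rw [hT, hcols]
    exact List.Pairwise.sublist List.filter_sublist (PySem.List.pairwise_lt_pyRange_one 0 C)
  have hTnodup : T.Nodup := hTpair.imp (fun h => ne_of_lt h)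
  have hmem : ∀ c, c ∈ bottom.keys ↔ c ∈ T := by
    intro c
    rw [← PySem.Dict.contains_iff_mem_keys, PySem.Dict.contains_eq_isSome_get?]
    by_cases hc : c ∈ cols
    · rw [hget c hc]
      simp [hT, hc]
    · rw [hget_none c hc]
      simp [hT, hc]
  have hperm : T.Perm bottom.keys :=
    (List.perm_ext_iff_of_nodup hTnodup hnodup).2 (fun c => (hmem c).symm)
  have hsorted : PySem.List.sorted bottom.keys (fun x => x) false = T :=
    PySem.List.sorted_eq_of_perm_of_pairwise_lt bottom.keys T (fun x => x) hperm hTpair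
  -- assemble both sides
  show (cols.foldl (fun acc col => acc ++ pvFindBottom matrix col
      (PySem.List.pyRange (R - 1) (-1) (-1))) []) = _
  rw [PySem.List.foldl_append_eq_flatMap]
  have hA : (cols.flatMap fun col =>
      pvFindBottom matrix col (PySem.List.pyRange (R - 1) (-1) (-1))) =
      T.map (fun c => ((fnd c).getD 0, c)) := by
    rw [← pvFlatMap_opt fnd cols]
    refine List.flatMap_congr (fun c _ => ?_)
    rw [pvFindBottom_eq_find? matrix c]
  rw [List.nil_append, hA]
  show _ = (PySem.List.sorted bottom.keys (fun x => x) false).map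
      (fun col => (bottom.getD col 0, col))
  rw [hsorted]
  refine List.map_congr_left (fun c hc => ?_)
  have hcc : c ∈ cols := by
    rw [hT] at hc; exact (List.mem_filter.1 hc).1
  rw [PySem.Dict.getD_eq_get?_getD, hget c hcc]

-- ===== VERDICT (by name: the statement is the Claim_ definition above) =====
theorem getAvail_spec : Claim_equal_getAvail := by
  intro matrix _ _
  unfold Spec_getAvail
  exact getAvail_spec_aux matrix
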